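-- pv_equiv track=rewrite | github.com/biggaben/Crackernaut | src/utils/variant_utils.py | extract_pattern_clusters
-- ===== SOURCE A (Python) =====
-- from typing import List, Set, Dict, Tuple, Optional
--
-- def extract_pattern_clusters(passwords: List[str], min_cluster_size: int = 3) -> Dict[str, List[str]]:
--     """Group passwords by common structural patterns."""
--     from collections import defaultdict
--
--     pattern_map = defaultdict(list)
--
--     for password in passwords:
--         if not password:
--             continue
--
--         # Create a structural fingerprint (e.g., "LLLDDDS" for "abc123!")
--         pattern = ''.join('L' if c.isalpha() else
--                          'D' if c.isdigit() else
--                          'S' for c in password)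
--
--         # Add length information to the pattern
--         length_pattern = f"{pattern}_{len(password)}"
--         pattern_map[length_pattern].append(password)
--
--     # Return only patterns with sufficient examples
--     return {k: v for k, v in pattern_map.items() if len(v) >= min_cluster_size}
-- ===== SOURCE B (Python) =====
-- def extract_pattern_clusters(passwords, min_cluster_size=3):
--     """Group passwords by structural pattern: keyed pass + ordered key dedup + per-key gather."""
--     def _fingerprint(p):
--         return ''.join('L' if c.isalpha() else
--                        'D' if c.isdigit() else
--                        'S' for c in p) + '_' + str(len(p))
--
--     keyed = [(_fingerprint(p), p) for p in passwords if p]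
--     keys = list(dict.fromkeys(k for k, _ in keyed))
--     result = {}
--     for k in keys:
--         group = [p for kk, p in keyed if kk == k]
--         if len(group) >= min_cluster_size:
--             result[k] = group
--     return result
-- ===== Notes on version B (the rewrite author's own statement) =====
-- stated objective: alternative
-- what changed: Replaces the defaultdict accumulation loop with a three-phase pipeline: build (fingerprint, password) pairs once, dedup the keys in first-occurrence order, then gather each cluster by a per-key scan and filter by size.
import Mathlib
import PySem

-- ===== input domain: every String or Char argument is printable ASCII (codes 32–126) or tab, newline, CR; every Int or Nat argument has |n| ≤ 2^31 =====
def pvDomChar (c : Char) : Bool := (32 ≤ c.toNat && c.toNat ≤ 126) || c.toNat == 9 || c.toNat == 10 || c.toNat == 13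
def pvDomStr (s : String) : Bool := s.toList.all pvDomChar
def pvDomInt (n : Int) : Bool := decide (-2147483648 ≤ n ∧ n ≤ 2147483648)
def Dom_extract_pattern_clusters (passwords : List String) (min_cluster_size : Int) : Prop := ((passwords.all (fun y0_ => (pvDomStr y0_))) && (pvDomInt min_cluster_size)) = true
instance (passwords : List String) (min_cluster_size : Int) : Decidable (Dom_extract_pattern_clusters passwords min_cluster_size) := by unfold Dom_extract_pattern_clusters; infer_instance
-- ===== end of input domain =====

-- B is an alternative decomposition of the same task, not faster: one keyed pass, ordered
-- key dedup, then a per-key gathering scan.  The fingerprint builder is the identical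
-- expression in both Pythons, so both ports share the helper pvFingerprint.
def pvFingerprint (p : String) : String :=
  String.ofList ((p.toList.map (fun c =>
      if PySem.Chars.isalpha c then 'L'
      else if PySem.Chars.isdigit c then 'D'
      else 'S')) ++ '_' :: (PySem.Int.toStr (p.toList.length : Int)).toList)

-- ===== PORT A =====
def extract_pattern_clusters (passwords : List String) (min_cluster_size : Int) : List (String × List String) :=
  -- the grouping loop (defaultdict(list) + append), then the size-filtering dict comprehension
  ((passwords.foldl (fun d password =>
      if password = "" then d
      else d.modify (pvFingerprint password) [] (· ++ [password]))
    (PySem.Dict.empty : PySem.Dict String (List String))).items.foldl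
      (fun r kv => if min_cluster_size ≤ (kv.2.length : Int) then r.insert kv.1 kv.2 else r)
      (PySem.Dict.empty : PySem.Dict String (List String))).items

-- ===== PORT B =====
-- keyed = [(_fingerprint(p), p) for p in passwords if p]
def pvKeyed (passwords : List String) : List (String × String) :=
  (passwords.filter (fun p => !(p = ""))).map (fun p => (pvFingerprint p, p))

-- group = [p for kk, p in keyed if kk == k]
def pvGroup (keyed : List (String × String)) (k : String) : List String :=
  (keyed.filter (fun kv => kv.1 == k)).map (·.2)

def extract_pattern_clusters_alt (passwords : List String) (min_cluster_size : Int) : List (String × List String) :=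
  -- keys = list(dict.fromkeys(...)); then gather each group, keep the large ones in key order
  (PySem.List.dedup ((pvKeyed passwords).map (·.1))).foldl
    (fun result k =>
      if min_cluster_size ≤ ((pvGroup (pvKeyed passwords) k).length : Int)
      then result ++ [(k, pvGroup (pvKeyed passwords) k)] else result)
    ([] : List (String × List String))

-- ===== PRECONDITION & SPEC =====
def Spec_extract_pattern_clusters (passwords : List String) (min_cluster_size : Int) (out : List (String × List String)) : Prop := out = extract_pattern_clusters_alt passwords min_cluster_size
instance (passwords : List String) (min_cluster_size : Int) (out : List (String × List String)) : Decidable (Spec_extract_pattern_clusters passwords min_cluster_size out) := by unfold Spec_extract_pattern_clusters; infer_instance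

-- ===== CLAIM (what is proved, stated in full; the proofs are below) =====
def Claim_equal_extract_pattern_clusters : Prop := ∀ (passwords : List String) (min_cluster_size : Int), Dom_extract_pattern_clusters passwords min_cluster_size → Spec_extract_pattern_clusters passwords min_cluster_size (extract_pattern_clusters passwords min_cluster_size)

-- ===== LEMMAS AND PROOFS =====

-- A's loop over all passwords, skipping empties, equals the grouping fold over B's keyed list.
theorem pv_fold_eq_keyed (passwords : List String) (d : PySem.Dict String (List String)) :
    passwords.foldl (fun d password =>
      if password = "" then d
      else d.modify (pvFingerprint password) [] (· ++ [password])) d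
    = (pvKeyed passwords).foldl (fun d kv => d.modify kv.1 [] (· ++ [kv.2])) d := by
  induction passwords generalizing d with
  | nil => rfl
  | cons p ps ih =>
    by_cases hp : p = "" <;> simp [pvKeyed, hp, ih]

-- A's final comprehension fold: the if-guard equals filtering first
theorem pv_foldl_if_insert (m : Int) (l : List (String × List String))
    (init : PySem.Dict String (List String)) :
    l.foldl (fun r kv => if m ≤ (kv.2.length : Int) then r.insert kv.1 kv.2 else r) init
      = (l.filter (fun kv => decide (m ≤ (kv.2.length : Int)))).foldl
          (fun r kv => r.insert kv.1 kv.2) init := by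
  induction l generalizing init with
  | nil => rfl
  | cons x xs ih =>
    by_cases hx : m ≤ (x.2.length : Int) <;> simp [hx, ih]

-- B's gathering fold: the if-guard equals filtering the key list first
theorem pv_foldl_if_append (m : Int) (keyed : List (String × String)) (ks : List String)
    (init : List (String × List String)) :
    ks.foldl (fun result k =>
        if m ≤ ((pvGroup keyed k).length : Int)
        then result ++ [(k, pvGroup keyed k)] else result) init
      = (ks.filter (fun k => decide (m ≤ ((pvGroup keyed k).length : Int)))).foldl
          (fun result k => result ++ [(k, pvGroup keyed k)]) init := by
  induction ks generalizing init with
  | nil => rfl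
  | cons x xs ih =>
    by_cases hx : m ≤ ((pvGroup keyed x).length : Int) <;> simp [hx, ih]

theorem pv_main :
    ∀ (passwords : List String) (min_cluster_size : Int),
      extract_pattern_clusters passwords min_cluster_size
        = extract_pattern_clusters_alt passwords min_cluster_size := by
  intro passwords m
  unfold extract_pattern_clusters extract_pattern_clusters_alt
  rw [pv_fold_eq_keyed]
  set keyed := pvKeyed passwords with hkeyed
  set pm := keyed.foldl (fun d kv => d.modify kv.1 [] (· ++ [kv.2])) (PySem.Dict.empty : PySem.Dict String (List String)) with hpm
  have hnd : pm.keys.Nodup := by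
    rw [hpm]
    exact PySem.Dict.nodup_keys_foldl_modify_key keyed Prod.fst [] (fun d kv => (· ++ [kv.2])) _ PySem.Dict.nodup_keys_empty
  have hkeys : pm.keys = PySem.List.dedup (keyed.map (·.1)) := by
    rw [hpm, PySem.Dict.keys_foldl_modify_key]
    simp [PySem.Dict.keys, PySem.Dict.empty, PySem.Set.update_nil_left, PySem.List.dedup_eq_ofList]
  have hgetD : ∀ k, pm.getD k [] = pvGroup keyed k := by
    intro k
    rw [hpm, PySem.Dict.getD_foldl_modify_append]
    simp [pvGroup, PySem.Dict.getD_empty]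
  have hitems : pm.items = pm.keys.map (fun k => (k, pvGroup keyed k)) := by
    rw [PySem.Dict.items_eq_map_keys pm hnd []]
    exact List.map_congr_left (fun k _ => by rw [hgetD])
  -- A side: comprehension fold = filter, then insert-fold over fresh distinct keys = append
  rw [pv_foldl_if_insert]
  rw [PySem.Dict.items_foldl_insert_fresh
      (l := pm.items.filter (fun kv => decide (m ≤ (kv.2.length : Int))))
      (k := Prod.fst) (v := Prod.snd) (d := PySem.Dict.empty)
      (by intro a _; exact PySem.Dict.contains_empty _)
      (by
        have hsub : ((pm.items.filter (fun kv => decide (m ≤ (kv.2.length : Int)))).map Prod.fst).Sublist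
            (pm.items.map Prod.fst) := (List.filter_sublist (l := pm.items)).map Prod.fst
        exact hsub.nodup hnd)]
  -- B side: its fold = filter then append-map
  rw [pv_foldl_if_append]
  rw [hitems, hkeys]
  rw [List.filter_map]
  rw [PySem.List.foldl_append_singleton_eq_map]
  simp [Function.comp_def, PySem.Dict.empty]

-- ===== VERDICT (by name: the statement is the Claim_ definition above) =====
theorem extract_pattern_clusters_spec : Claim_equal_extract_pattern_clusters := by
  intro passwords m _
  exact pv_main passwords m
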